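-- pv_equiv track=rewrite | github.com/angelsenra/competition-toolkit | number.py | sixn
-- ===== SOURCE A (Python) =====
-- def sixn(m):
--     """
--     Yields numbers of the form 6n + 1 and 6n - 1
--     All primes are of the form 6n + 1 or 6n - 1
--
--     :param int m: Upper limit
--     :returns: Numbers of the form 6n + 1 and 6n - 1
--     :rtype: int
--     """
--     yield from range(2, min(m, 4))
--     for i in range(6, m - 1, 6):
--         yield from (i - 1, i + 1)
--     try:
--         if i + 5 < m:
--             yield i + 5
--     except NameError:
--         if 5 < m:
--             yield 5
-- ===== SOURCE B (Python) =====
-- def sixn(m):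
--     for x in range(2, m):
--         if x < 4 or x % 6 in (1, 5):
--             yield x
-- ===== Notes on version B (the rewrite author's own statement) =====
-- stated objective: simpler
-- what changed: Instead of stepping through multiples of 6 and yielding i-1,i+1 pairs with a try/except-NameError tail fix-up, B scans every integer in range(2, m) once and keeps x when x < 4 or x % 6 is 1 or 5 (a residue filter instead of a constructive stepped generator).
import Mathlib
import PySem

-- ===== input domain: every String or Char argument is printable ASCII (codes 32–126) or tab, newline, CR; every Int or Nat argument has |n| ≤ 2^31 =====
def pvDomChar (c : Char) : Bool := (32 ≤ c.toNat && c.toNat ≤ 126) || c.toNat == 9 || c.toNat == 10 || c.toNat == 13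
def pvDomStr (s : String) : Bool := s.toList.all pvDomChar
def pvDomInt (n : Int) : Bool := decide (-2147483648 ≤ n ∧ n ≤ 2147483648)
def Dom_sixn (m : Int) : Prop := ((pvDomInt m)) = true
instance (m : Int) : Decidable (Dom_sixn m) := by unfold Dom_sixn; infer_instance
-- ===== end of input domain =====

-- B replaces A's stepped 6-range with paired yields and the try/except-NameError tail by a
-- single residue filter: scan range(2, m) once, keep x when x < 4 or x % 6 in (1, 5)
-- (objective: simpler; same O(m) cost).


-- ===== PORT A =====
-- 'yield from range(2, min(m, 4))', then the for-loop over range(6, m-1, 6) yielding i-1, i+1,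
-- then the try/except tail: 'i' exists iff the range was nonempty, and then equals its last element.
def sixn (m : Int) : List Int :=
  let part1 := PySem.List.pyRange 2 (min m 4) 1
  let r := PySem.List.pyRange 6 (m - 1) 6
  let body := r.foldl (fun acc i => acc ++ [i - 1, i + 1]) []
  let tail :=
    match r.getLast? with
    | some i => if i + 5 < m then [i + 5] else []      -- 'i' is defined: last loop value
    | none => if 5 < m then [5] else []                -- NameError branch
  part1 ++ body ++ tail

-- ===== PORT B =====
-- 'x < 4 or x % 6 in (1, 5)'
def sixnCond (x : Int) : Bool :=
  decide (x < 4) || (PySem.Int.mod x 6 == 1) || (PySem.Int.mod x 6 == 5)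

-- 'for x in range(2, m): if <cond>: yield x'
def sixn_alt (m : Int) : List Int :=
  (PySem.List.pyRange 2 m 1).foldl (fun acc x => if sixnCond x then acc ++ [x] else acc) []

-- ===== PRECONDITION & SPEC =====
def Spec_sixn (m : Int) (out : List Int) : Prop := out = sixn_alt m
instance (m : Int) (out : List Int) : Decidable (Spec_sixn m out) := by unfold Spec_sixn; infer_instance

-- ===== CLAIM (what is proved, stated in full; the proofs are below) =====
def Claim_equal_sixn : Prop := ∀ (m : Int), Dom_sixn m → Spec_sixn m (sixn m)

-- ===== LEMMAS AND PROOFS =====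

-- canonical intermediate form both ports are reduced to: 2, 3, then 6n∓1 for n = 1, 2, …
def sixnLoop (m n : Int) : List Int :=
  if 6 * n - 1 < m then
    (6 * n - 1) :: ((if 6 * n + 1 < m then [6 * n + 1] else []) ++ sixnLoop m (n + 1))
  else []
termination_by (m - (6 * n - 1)).toNat
decreasing_by omega

def sixnPrefix (m : Int) : List Int :=
  (if 2 < m then [2] else []) ++ (if 3 < m then [3] else [])

-- range(a, b, 6) unfolds as a cons when a < b
theorem pyRange_six_cons (a b : Int) (h : a < b) :
    PySem.List.pyRange a b 6 = a :: PySem.List.pyRange (a + 6) b 6 := by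
  rw [PySem.List.pyRange_of_pos a b (by norm_num),
      PySem.List.pyRange_of_pos (a + 6) b (by norm_num)]
  have hc : (if a < b then ((b - a + 6 - 1) / 6).toNat else 0)
      = (if a + 6 < b then ((b - (a + 6) + 6 - 1) / 6).toNat else 0) + 1 := by
    split_ifs <;> omega
  rw [hc, List.range_succ_eq_map, List.map_cons, List.map_map]
  refine congrArg₂ _ (by ring) ?_
  refine List.map_congr_left fun k _ => ?_
  simp only [Function.comp]
  push_cast
  ring

theorem pyRange_six_nil (a b : Int) (h : b ≤ a) : PySem.List.pyRange a b 6 = [] := by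
  rw [PySem.List.pyRange_of_pos a b (by norm_num)]
  rw [if_neg (by omega)]
  simp

-- one-step unfolding of the canonical loop when the body will not run again
theorem sixnLoop_last (m n : Int) (h : m ≤ 6 * n + 1) :
    sixnLoop m n = if 6 * n - 1 < m then [6 * n - 1] else [] := by
  rw [sixnLoop]
  by_cases h1 : 6 * n - 1 < m
  · rw [if_pos h1, if_pos h1, if_neg (show ¬ 6 * n + 1 < m by omega),
        sixnLoop, if_neg (show ¬ 6 * (n + 1) - 1 < m by omega)]
    simp
  · rw [if_neg h1, if_neg h1]

-- A's for-loop + tail, started at 6*n, equals the canonical loop from n, onto any accumulator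
theorem loop_eq (d : Nat) : ∀ (m n : Int) (acc : List Int),
    (m - 6 * n).toNat = d → 6 * n ≤ m - 2 →
    ((PySem.List.pyRange (6 * n) (m - 1) 6).foldl (fun acc i => acc ++ [i - 1, i + 1]) acc)
      ++ (match (PySem.List.pyRange (6 * n) (m - 1) 6).getLast? with
          | some i => if i + 5 < m then [i + 5] else []
          | none => if 5 < m then [5] else [])
      = acc ++ sixnLoop m n := by
  induction d using Nat.strong_induction_on with
  | _ d ih =>
    intro m n acc hd h
    have hcons := pyRange_six_cons (6 * n) (m - 1) (by omega)
    by_cases h2 : 6 * (n + 1) ≤ m - 2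
    · -- the range has at least two elements; recurse
      have hd' : (m - 6 * (n + 1)).toNat < d := by omega
      have := ih _ hd' m (n + 1) (acc ++ [6 * n - 1, 6 * n + 1]) rfl h2
      have hcons' := pyRange_six_cons (6 * (n + 1)) (m - 1) (by omega)
      rw [sixnLoop, if_pos (show 6 * n - 1 < m by omega),
          if_pos (show 6 * n + 1 < m by omega),
          hcons, List.foldl_cons, show (6:Int) * n + 6 = 6 * (n + 1) by ring,
          hcons', List.getLast?_cons_cons, ← hcons', this]
      simp
    · -- last iteration: the rest of the range is empty
      have hnil : PySem.List.pyRange (6 * n + 6) (m - 1) 6 = [] :=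
        pyRange_six_nil _ _ (by omega)
      rw [hcons, hnil]
      simp only [List.foldl_cons, List.foldl_nil, List.getLast?_singleton]
      rw [sixnLoop, if_pos (show 6 * n - 1 < m by omega),
          if_pos (show 6 * n + 1 < m by omega),
          sixnLoop_last m (n + 1) (by omega),
          show 6 * (n + 1) - 1 = 6 * n + 5 by ring]
      simp

-- A's prefix: range(2, min(m,4)) is [2 if 2<m] ++ [3 if 3<m]
theorem prefix_eq (m : Int) : PySem.List.pyRange 2 (min m 4) 1 = sixnPrefix m := by
  unfold sixnPrefix
  by_cases h : 4 ≤ m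
  · rw [show min m 4 = 4 by omega, if_pos (by omega), if_pos (by omega)]
    decide
  · by_cases h2 : m ≤ 2
    · rw [show min m 4 = m by omega, PySem.List.pyRange_one_eq_nil h2,
          if_neg (by omega), if_neg (by omega)]
      rfl
    · have hm : m = 3 := by omega
      subst hm
      decide

-- A reduced to the canonical form
theorem sixn_char (m : Int) : sixn m = sixnPrefix m ++ sixnLoop m 1 := by
  unfold sixn
  simp only []
  rw [prefix_eq m, List.append_assoc]
  congr 1
  by_cases h : (8 : Int) ≤ m
  · have := loop_eq (m - 6 * 1).toNat m 1 [] rfl (by omega)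
    simpa using this
  · rw [pyRange_six_nil 6 (m - 1) (by omega)]
    simp only [List.foldl_nil, List.getLast?_nil, List.nil_append]
    rw [sixnLoop_last m 1 (by omega)]
    norm_num

-- evaluating B's condition at each residue (for n ≥ 1)
theorem cond_hit_lo (n : Int) : sixnCond (6 * n - 1) = true := by
  simp only [sixnCond, PySem.Int.mod_eq_emod_of_pos (a := 6 * n - 1) (by norm_num : (0:Int) < 6),
    Bool.or_eq_true, decide_eq_true_eq, beq_iff_eq]
  omega

theorem cond_hit_hi (n : Int) : sixnCond (6 * n + 1) = true := by
  simp only [sixnCond, PySem.Int.mod_eq_emod_of_pos (a := 6 * n + 1) (by norm_num : (0:Int) < 6),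
    Bool.or_eq_true, decide_eq_true_eq, beq_iff_eq]
  omega

theorem cond_miss (n r : Int) (h : 1 ≤ n) (hr : r = 0 ∨ r = 2 ∨ r = 3 ∨ r = 4) :
    sixnCond (6 * n + r) = false := by
  simp only [sixnCond, PySem.Int.mod_eq_emod_of_pos (a := 6 * n + r) (by norm_num : (0:Int) < 6),
    Bool.or_eq_false_iff, decide_eq_false_iff_not, beq_eq_false_iff_ne, ne_eq]
  omega

-- B's filter over range(6n-1, m) equals the canonical loop from n
theorem filter_loop_eq (d : Nat) : ∀ (m n : Int), (m - (6 * n - 1)).toNat = d → 1 ≤ n →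
    (PySem.List.pyRange (6 * n - 1) m 1).filter sixnCond = sixnLoop m n := by
  induction d using Nat.strong_induction_on with
  | _ d ih =>
    intro m n hd hn
    by_cases h0 : m ≤ 6 * n - 1
    · rw [PySem.List.pyRange_one_eq_nil h0, sixnLoop, if_neg (by omega)]
      rfl
    · rw [PySem.List.pyRange_one_cons (by omega), List.filter_cons_of_pos (cond_hit_lo n),
          sixnLoop, if_pos (by omega)]
      congr 1
      rw [show 6 * n - 1 + 1 = 6 * n + 0 by ring]
      by_cases h1 : m ≤ 6 * n + 0
      · rw [PySem.List.pyRange_one_eq_nil h1, if_neg (by omega), sixnLoop, if_neg (by omega)]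
        rfl
      · rw [PySem.List.pyRange_one_cons (by omega),
            List.filter_cons_of_neg (by have h := cond_miss n 0 hn (by norm_num); simpa using h)]
        by_cases h2 : m ≤ 6 * n + 1
        · rw [PySem.List.pyRange_one_eq_nil (by omega), if_neg (by omega),
              sixnLoop, if_neg (by omega)]
          rfl
        · rw [show 6 * n + 0 + 1 = 6 * n + 1 by ring, PySem.List.pyRange_one_cons (by omega),
              List.filter_cons_of_pos (cond_hit_hi n), if_pos (by omega)]
          simp only [List.singleton_append, List.cons.injEq, true_and]
          by_cases h3 : m ≤ 6 * n + 2
          · rw [PySem.List.pyRange_one_eq_nil (by omega), sixnLoop, if_neg (by omega)]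
            rfl
          · rw [show 6 * n + 1 + 1 = 6 * n + 2 by ring, PySem.List.pyRange_one_cons (by omega),
                List.filter_cons_of_neg (by have h := cond_miss n 2 hn (by norm_num); simpa using h)]
            by_cases h4 : m ≤ 6 * n + 3
            · rw [PySem.List.pyRange_one_eq_nil (by omega), sixnLoop, if_neg (by omega)]
              rfl
            · rw [show 6 * n + 2 + 1 = 6 * n + 3 by ring, PySem.List.pyRange_one_cons (by omega),
                  List.filter_cons_of_neg (by have h := cond_miss n 3 hn (by norm_num); simpa using h)]
              by_cases h5 : m ≤ 6 * n + 4
              · rw [PySem.List.pyRange_one_eq_nil (by omega), sixnLoop, if_neg (by omega)]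
                rfl
              · rw [show 6 * n + 3 + 1 = 6 * n + 4 by ring, PySem.List.pyRange_one_cons (by omega),
                    List.filter_cons_of_neg (by have h := cond_miss n 4 hn (by norm_num); simpa using h),
                    show 6 * n + 4 + 1 = 6 * (n + 1) - 1 by ring]
                exact ih _ (by omega) m (n + 1) rfl (by omega)

-- B reduced to the canonical form
theorem sixn_alt_char (m : Int) : sixn_alt m = sixnPrefix m ++ sixnLoop m 1 := by
  unfold sixn_alt
  rw [PySem.List.foldl_append_if_eq_filter, List.nil_append]
  by_cases h : 5 ≤ m
  · rw [PySem.List.pyRange_one_append 2 5 m (by norm_num) h, List.filter_append,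
        show (5:Int) = 6 * 1 - 1 by norm_num,
        filter_loop_eq (m - (6 * 1 - 1)).toNat m 1 rfl (by norm_num)]
    congr 1
    unfold sixnPrefix
    rw [if_pos (by omega), if_pos (by omega)]
    decide
  · rw [sixnLoop, if_neg (by omega), List.append_nil]
    unfold sixnPrefix
    by_cases h2 : m ≤ 2
    · rw [PySem.List.pyRange_one_eq_nil h2, if_neg (by omega), if_neg (by omega)]
      rfl
    · have hm : m = 3 ∨ m = 4 := by omega
      rcases hm with hm | hm <;> subst hm <;> decide

-- ===== VERDICT (by name: the statement is the Claim_ definition above) =====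
theorem sixn_spec : Claim_equal_sixn := by
  intro m _
  unfold Spec_sixn
  rw [sixn_char, sixn_alt_char]
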